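-- pv_equiv track=rewrite | github.com/honghuy127/aegis-runtime-public | core/scenario_runner/skyscanner/ui_actions.py | _skyscanner_date_openers
-- ===== SOURCE A (Python) =====
-- from typing import Any, Dict, List, Optional
--
-- def _skyscanner_date_openers(role: str, step_selectors: List[str] | None = None) -> List[str]:
--     role_key = str(role or "").strip().lower()
--     defaults: List[str]
--     if role_key == "return":
--         defaults = [
--             "button[data-testid='return-btn']",
--             "[data-testid='return-btn'] button",
--             "button:has(span:has-text('復路'))",
--             "button:has-text('復路')",
--         ]
--     else:
--         defaults = [
--             "button[data-testid='depart-btn']",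
--             "[data-testid='depart-btn'] button",
--             "button:has(span:has-text('出発'))",
--             "button:has-text('出発')",
--         ]
--     out: List[str] = []
--     extra_non_input: List[str] = []
--     extra_input: List[str] = []
--     for item in list(step_selectors or []):
--         text = str(item or "").strip()
--         if not text:
--             continue
--         lowered = text.lower()
--         if "input" in lowered:
--             extra_input.append(text)
--         else:
--             extra_non_input.append(text)
--     capped_extra_non_input = extra_non_input[:3]
--     capped_extra_input = extra_input[:2]
--     for item in defaults + capped_extra_non_input + capped_extra_input:
--         text = str(item or "").strip()
--         if text and text not in out:
--             out.append(text)
--     return out[:8]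
-- ===== SOURCE B (Python) =====
-- from typing import List
--
-- def _skyscanner_date_openers(role: str, step_selectors: List[str] | None = None) -> List[str]:
--     role_key = str(role or "").strip().lower()
--     if role_key == "return":
--         out = [
--             "button[data-testid='return-btn']",
--             "[data-testid='return-btn'] button",
--             "button:has(span:has-text('復路'))",
--             "button:has-text('復路')",
--         ]
--     else:
--         out = [
--             "button[data-testid='depart-btn']",
--             "[data-testid='depart-btn'] button",
--             "button:has(span:has-text('出発'))",
--             "button:has-text('出発')",
--         ]
--     tail: List[str] = []
--     non_input_used = 0
--     input_used = 0
--     for item in step_selectors or []: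
--         text = str(item or "").strip()
--         if not text:
--             continue
--         if "input" in text.lower():
--             # input selectors go after all non-input ones; they can only collide with other input selectors
--             if input_used < 2:
--                 input_used += 1
--                 if text not in tail:
--                     tail.append(text)
--         elif non_input_used < 3:
--             non_input_used += 1
--             if text not in out:
--                 out.append(text)
--     return (out + tail)[:8]
-- ===== Notes on version B (the rewrite author's own statement) =====
-- stated objective: simpler
-- what changed: A partitions selectors into two lists, slices each, concatenates with the defaults and dedups in a second stripping pass; B seeds the output with the defaults and makes one counter-driven pass that caps and dedup-appends each selector directly, concatenating the input-selector tail at the end.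
import Mathlib
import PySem

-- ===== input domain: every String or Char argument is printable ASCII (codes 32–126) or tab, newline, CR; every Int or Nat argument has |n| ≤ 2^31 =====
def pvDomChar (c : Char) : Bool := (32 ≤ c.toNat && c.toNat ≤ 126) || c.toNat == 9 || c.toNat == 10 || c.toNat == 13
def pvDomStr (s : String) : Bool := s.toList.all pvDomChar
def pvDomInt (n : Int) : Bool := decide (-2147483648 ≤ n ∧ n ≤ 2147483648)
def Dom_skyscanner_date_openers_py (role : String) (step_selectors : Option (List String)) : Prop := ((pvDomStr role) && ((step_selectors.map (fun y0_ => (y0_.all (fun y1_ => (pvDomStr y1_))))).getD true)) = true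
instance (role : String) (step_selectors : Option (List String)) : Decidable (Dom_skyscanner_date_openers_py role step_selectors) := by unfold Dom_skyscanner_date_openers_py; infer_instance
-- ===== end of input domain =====

-- B replaces A's partition-into-two-lists / slice / re-concatenate-and-dedup two-phase
-- structure by one counter-driven pass appending directly to the output (objective: simpler).

-- ===== PORT A =====
-- loop body of A's partition loop: classify each stripped, non-empty selector
def pvAPartStep (acc : List String × List String) (item : String) : List String × List String :=
  let text := PySem.Str.strip (if item == "" then "" else item)
  if text == "" then acc
  else if PySem.Str.isIn "input" (PySem.Str.lower text) then (acc.1, acc.2 ++ [text])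
  else (acc.1 ++ [text], acc.2)

-- loop body of A's final dedup loop: re-strip, keep if non-empty and unseen
def pvADedupStep (out : List String) (item : String) : List String :=
  let text := PySem.Str.strip (if item == "" then "" else item)
  if text != "" && !(out.contains text) then out ++ [text] else out

def skyscanner_date_openers_py (role : String) (step_selectors : Option (List String)) : List String :=
  let role_key := PySem.Str.lower (PySem.Str.strip (if role == "" then "" else role))
  let defaults : List String :=
    if role_key == "return" then
      ["button[data-testid='return-btn']",
       "[data-testid='return-btn'] button",
       "button:has(span:has-text('復路'))",
       "button:has-text('復路')"]
    else
      ["button[data-testid='depart-btn']",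
       "[data-testid='depart-btn'] button",
       "button:has(span:has-text('出発'))",
       "button:has-text('出発')"]
  let extras := (step_selectors.getD []).foldl pvAPartStep ([], [])
  ((defaults ++ extras.1.take 3 ++ extras.2.take 2).foldl pvADedupStep []).take 8

-- ===== PORT B =====
-- append t to out unless already present (B's "if text not in out: out.append(text)")
def pvDstep (out : List String) (t : String) : List String :=
  if out.contains t then out else out ++ [t]

-- loop body of B's single pass: state = (out, tail, non_input_used, input_used)
def pvBStep (st : List String × List String × Nat × Nat) (item : String) :
    List String × List String × Nat × Nat :=
  let text := PySem.Str.strip (if item == "" then "" else item)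
  if text == "" then st
  else if PySem.Str.isIn "input" (PySem.Str.lower text) then
    if st.2.2.2 < 2 then (st.1, pvDstep st.2.1 text, st.2.2.1, st.2.2.2 + 1) else st
  else
    if st.2.2.1 < 3 then (pvDstep st.1 text, st.2.1, st.2.2.1 + 1, st.2.2.2) else st

def skyscanner_date_openers_py_alt (role : String) (step_selectors : Option (List String)) : List String :=
  let role_key := PySem.Str.lower (PySem.Str.strip (if role == "" then "" else role))
  let out0 : List String :=
    if role_key == "return" then
      ["button[data-testid='return-btn']",
       "[data-testid='return-btn'] button",
       "button:has(span:has-text('復路'))",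
       "button:has-text('復路')"]
    else
      ["button[data-testid='depart-btn']",
       "[data-testid='depart-btn'] button",
       "button:has(span:has-text('出発'))",
       "button:has-text('出発')"]
  let st := (step_selectors.getD []).foldl pvBStep (out0, [], 0, 0)
  (st.1 ++ st.2.1).take 8

-- ===== PRECONDITION & SPEC =====
def Spec_skyscanner_date_openers_py (role : String) (step_selectors : Option (List String)) (out : List String) : Prop := out = skyscanner_date_openers_py_alt role step_selectors
instance (role : String) (step_selectors : Option (List String)) (out : List String) : Decidable (Spec_skyscanner_date_openers_py role step_selectors out) := by unfold Spec_skyscanner_date_openers_py; infer_instance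

-- ===== CLAIM (what is proved, stated in full; the proofs are below) =====
def Claim_equal_skyscanner_date_openers_py : Prop := ∀ (role : String) (step_selectors : Option (List String)), Dom_skyscanner_date_openers_py role step_selectors → Spec_skyscanner_date_openers_py role step_selectors (skyscanner_date_openers_py role step_selectors)

-- ===== LEMMAS AND PROOFS =====

-- the stripped text of an item, and the "contains 'input'" classifier
def pvText (item : String) : String := PySem.Str.strip (if item == "" then "" else item)
def pvHasInput (t : String) : Bool := PySem.Str.isIn "input" (PySem.Str.lower t)

-- the two streams A's partition loop produces
def pvNI (sels : List String) : List String :=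
  (sels.map pvText).filter (fun t => !(t == "") && !pvHasInput t)
def pvI (sels : List String) : List String :=
  (sels.map pvText).filter (fun t => !(t == "") && pvHasInput t)

lemma pv_dw_head {α : Type} (p : α → Bool) (l : List α) (h : 0 < (List.dropWhile p l).length) :
    p ((List.dropWhile p l)[0]) = false := by
  have h2 := List.head?_dropWhile_not p l
  have h3 : (List.dropWhile p l).head? = some ((List.dropWhile p l)[0]) := by
    rw [List.head?_eq_getElem?]
    exact List.getElem?_eq_getElem h
  rw [h3] at h2
  exact h2

lemma pv_dw_idem {α : Type} (p : α → Bool) (l : List α) :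
    List.dropWhile p (List.dropWhile p l) = List.dropWhile p l := by
  rw [List.dropWhile_eq_self_iff]
  intro hl
  simpa using pv_dw_head p l hl

lemma pv_dstrip_aux {α : Type} (p : α → Bool) (X R t : List α)
    (ht : X = R.reverse ++ t)
    (hX : ∀ h : 0 < X.length, p (X[0]) = false) :
    List.dropWhile p R.reverse = R.reverse := by
  rw [List.dropWhile_eq_self_iff]
  intro hl
  have hlen : 0 < X.length := by
    subst ht; simp only [List.length_append, List.length_reverse] at *; omega
  have h0 := hX hlen
  have he : X[0]'hlen = R.reverse[0]'hl := by
    subst ht; exact List.getElem_append_left hl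
  rw [he] at h0
  simpa using h0

lemma pv_chars_strip_idem (cs : List Char) :
    PySem.Chars.strip (PySem.Chars.strip cs) = PySem.Chars.strip cs := by
  unfold PySem.Chars.strip PySem.Chars.rstrip PySem.Chars.lstrip
  obtain ⟨t, ht⟩ := List.dropWhile_suffix (l := (List.dropWhile PySem.Chars.isspace cs).reverse)
    (p := PySem.Chars.isspace)
  have hXeq : List.dropWhile PySem.Chars.isspace cs
      = (List.dropWhile PySem.Chars.isspace
          (List.dropWhile PySem.Chars.isspace cs).reverse).reverse ++ t.reverse := by
    have h2 := congrArg List.reverse ht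
    simpa [List.reverse_append] using h2.symm
  have h1 := pv_dstrip_aux PySem.Chars.isspace (List.dropWhile PySem.Chars.isspace cs)
    (List.dropWhile PySem.Chars.isspace (List.dropWhile PySem.Chars.isspace cs).reverse)
    t.reverse hXeq (fun h => pv_dw_head PySem.Chars.isspace cs h)
  rw [h1, List.reverse_reverse, pv_dw_idem]

lemma pv_str_strip_idem (s : String) :
    PySem.Str.strip (PySem.Str.strip s) = PySem.Str.strip s := by
  simp [PySem.Str.strip, pv_chars_strip_idem]

lemma pvText_idem (x : String) : pvText (pvText x) = pvText x := by
  unfold pvText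
  by_cases h : PySem.Str.strip (if x == "" then "" else x) = ""
  · rw [h]; rfl
  · rw [if_neg (by simpa using h), pv_str_strip_idem]

lemma pvAPartStep_eq (acc : List String × List String) (x : String) :
    pvAPartStep acc x =
      if pvText x == "" then acc
      else if pvHasInput (pvText x) then (acc.1, acc.2 ++ [pvText x])
      else (acc.1 ++ [pvText x], acc.2) := rfl

lemma pvADedupStep_eq (out : List String) (x : String) :
    pvADedupStep out x =
      if pvText x != "" && !(out.contains (pvText x)) then out ++ [pvText x] else out := rfl

lemma pvBStep_eq (st : List String × List String × Nat × Nat) (x : String) :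
    pvBStep st x =
      if pvText x == "" then st
      else if pvHasInput (pvText x) then
        if st.2.2.2 < 2 then (st.1, pvDstep st.2.1 (pvText x), st.2.2.1, st.2.2.2 + 1) else st
      else
        if st.2.2.1 < 3 then (pvDstep st.1 (pvText x), st.2.1, st.2.2.1 + 1, st.2.2.2) else st := rfl

lemma pv_mem_pvNI {y : String} {s : List String} (h : y ∈ pvNI s) :
    pvText y = y ∧ y ≠ "" ∧ pvHasInput y = false := by
  unfold pvNI at h
  simp only [List.mem_filter, List.mem_map, Bool.and_eq_true, Bool.not_eq_true',
    beq_eq_false_iff_ne, ne_eq] at h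
  obtain ⟨⟨x, _, rfl⟩, hp1, hp2⟩ := h
  exact ⟨pvText_idem x, hp1, hp2⟩

lemma pv_mem_pvI {y : String} {s : List String} (h : y ∈ pvI s) :
    pvText y = y ∧ y ≠ "" ∧ pvHasInput y = true := by
  unfold pvI at h
  simp only [List.mem_filter, List.mem_map, Bool.and_eq_true, Bool.not_eq_true',
    beq_eq_false_iff_ne, ne_eq] at h
  obtain ⟨⟨x, _, rfl⟩, hp1, hp2⟩ := h
  exact ⟨pvText_idem x, hp1, hp2⟩

lemma pvA_part (sels : List String) : ∀ a b : List String,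
    sels.foldl pvAPartStep (a, b) = (a ++ pvNI sels, b ++ pvI sels) := by
  induction sels with
  | nil => intro a b; simp [pvNI, pvI]
  | cons x r ih =>
    intro a b
    rw [List.foldl_cons, pvAPartStep_eq]
    by_cases h1 : pvText x = ""
    · simp [h1, ih, pvNI, pvI]
    · by_cases h2 : pvHasInput (pvText x)
      · simp [h1, h2, ih, pvNI, pvI, List.append_assoc]
      · simp [h1, h2, ih, pvNI, pvI, List.append_assoc]

lemma pvA_dedup_clean (ys : List String) : ∀ out : List String,
    (∀ y ∈ ys, pvText y = y ∧ y ≠ "") →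
    ys.foldl pvADedupStep out = ys.foldl pvDstep out := by
  induction ys with
  | nil => intro out _; rfl
  | cons y r ih =>
    intro out h
    have hy := h y (by simp)
    have hstep : pvADedupStep out y = pvDstep out y := by
      rw [pvADedupStep_eq, hy.1]
      have hne : (y != "") = true := by simpa using hy.2
      by_cases hc : out.contains y = true <;> simp [pvDstep, hne, hc]
    rw [List.foldl_cons, List.foldl_cons, hstep, ih _ (fun z hz => h z (by simp [hz]))]

lemma pv_mem_foldl_dstep (ys : List String) : ∀ (out : List String) (x : String),
    x ∈ ys.foldl pvDstep out → x ∈ out ∨ x ∈ ys := by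
  induction ys with
  | nil => intro out x h; exact Or.inl h
  | cons y r ih =>
    intro out x h
    rw [List.foldl_cons] at h
    rcases ih _ x h with h2 | h2
    · unfold pvDstep at h2
      split_ifs at h2 with hc
      · exact Or.inl h2
      · rcases List.mem_append.1 h2 with h3 | h3
        · exact Or.inl h3
        · simp only [List.mem_singleton] at h3
          subst h3
          exact Or.inr (by simp)
    · exact Or.inr (by simp [h2])

lemma pv_foldl_dstep_append (ys : List String) : ∀ (O T : List String),
    (∀ y ∈ ys, y ∉ O) →
    ys.foldl pvDstep (O ++ T) = O ++ ys.foldl pvDstep T := by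
  induction ys with
  | nil => intro O T _; rfl
  | cons y r ih =>
    intro O T h
    have hy : y ∉ O := h y (by simp)
    have hstep : pvDstep (O ++ T) y = O ++ pvDstep T y := by
      unfold pvDstep
      have hc : (O ++ T).contains y = T.contains y := by
        simp [List.contains_eq_mem, List.mem_append, hy]
      rw [hc]
      by_cases hT : y ∈ T <;> simp [hT, List.append_assoc]
    rw [List.foldl_cons, List.foldl_cons, hstep, ih _ _ (fun z hz => h z (by simp [hz]))]

lemma pvB_inv (sels : List String) : ∀ (out tail : List String) (nu iu : Nat),
    (sels.foldl pvBStep (out, tail, nu, iu)).1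
      = List.foldl pvDstep out ((pvNI sels).take (3 - nu)) ∧
    (sels.foldl pvBStep (out, tail, nu, iu)).2.1
      = List.foldl pvDstep tail ((pvI sels).take (2 - iu)) := by
  induction sels with
  | nil => intro out tail nu iu; simp [pvNI, pvI]
  | cons x r ih =>
    intro out tail nu iu
    rw [List.foldl_cons, pvBStep_eq]
    by_cases h1 : pvText x = ""
    · have hNIc : pvNI (x :: r) = pvNI r := by simp [pvNI, h1]
      have hIc : pvI (x :: r) = pvI r := by simp [pvI, h1]
      rw [hNIc, hIc, if_pos (show (pvText x == "") = true by simp [h1])]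
      exact ih out tail nu iu
    · have hb1 : ¬((pvText x == "") = true) := by simp [h1]
      by_cases h2 : pvHasInput (pvText x)
      · have hNIc : pvNI (x :: r) = pvNI r := by simp [pvNI, h2]
        have hIc : pvI (x :: r) = pvText x :: pvI r := by simp [pvI, h1, h2]
        by_cases h3 : iu < 2
        · have h4 : 2 - iu = (2 - (iu + 1)) + 1 := by omega
          rw [if_neg hb1, if_pos h2, if_pos h3, hNIc, hIc, h4, List.take_succ_cons,
            List.foldl_cons]
          exact ih out (pvDstep tail (pvText x)) nu (iu + 1)
        · have h4 : 2 - iu = 0 := by omega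
          rw [if_neg hb1, if_pos h2, if_neg h3, hNIc, hIc, h4]
          have := ih out tail nu iu
          rw [h4] at this
          simpa using this
      · have hb2 : pvHasInput (pvText x) = false := by simpa using h2
        have hNIc : pvNI (x :: r) = pvText x :: pvNI r := by
          simp [pvNI, h1, hb2]
        have hIc : pvI (x :: r) = pvI r := by simp [pvI, hb2]
        by_cases h3 : nu < 3
        · have h4 : 3 - nu = (3 - (nu + 1)) + 1 := by omega
          rw [if_neg hb1, if_neg h2, if_pos h3, hNIc, hIc, h4, List.take_succ_cons,
            List.foldl_cons]
          exact ih (pvDstep out (pvText x)) tail (nu + 1) iu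
        · have h4 : 3 - nu = 0 := by omega
          rw [if_neg hb1, if_neg h2, if_neg h3, hNIc, hIc, h4]
          have := ih out tail nu iu
          rw [h4] at this
          simpa using this

lemma pv_main_core (D S : List String)
    (hD : List.foldl pvADedupStep [] D = D)
    (hDg : ∀ d ∈ D, pvHasInput d = false) :
    (List.foldl pvADedupStep [] (D ++ (pvNI S).take 3 ++ (pvI S).take 2)).take 8
      = ((S.foldl pvBStep (D, [], 0, 0)).1 ++ (S.foldl pvBStep (D, [], 0, 0)).2.1).take 8 := by
  obtain ⟨h1, h2⟩ := pvB_inv S D [] 0 0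
  rw [h1, h2, List.foldl_append, List.foldl_append, hD]
  have hni : ∀ y ∈ (pvNI S).take 3, pvText y = y ∧ y ≠ "" := fun y hy =>
    ⟨(pv_mem_pvNI (List.mem_of_mem_take hy)).1, (pv_mem_pvNI (List.mem_of_mem_take hy)).2.1⟩
  have hi2 : ∀ y ∈ (pvI S).take 2, pvText y = y ∧ y ≠ "" := fun y hy =>
    ⟨(pv_mem_pvI (List.mem_of_mem_take hy)).1, (pv_mem_pvI (List.mem_of_mem_take hy)).2.1⟩
  rw [pvA_dedup_clean _ _ hni, pvA_dedup_clean _ _ hi2]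
  have hO : ∀ y ∈ (pvI S).take 2, y ∉ List.foldl pvDstep D ((pvNI S).take 3) := by
    intro y hy hmem
    have hyI := (pv_mem_pvI (List.mem_of_mem_take hy)).2.2
    rcases pv_mem_foldl_dstep _ _ _ hmem with hm | hm
    · rw [hDg y hm] at hyI; exact absurd hyI (by simp)
    · rw [(pv_mem_pvNI (List.mem_of_mem_take hm)).2.2] at hyI
      exact absurd hyI (by simp)
  have hsplit := pv_foldl_dstep_append ((pvI S).take 2)
    (List.foldl pvDstep D ((pvNI S).take 3)) [] hO
  simp only [List.append_nil] at hsplit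
  rw [hsplit]

-- ===== VERDICT (by name: the statement is the Claim_ definition above) =====
theorem skyscanner_date_openers_py_spec : Claim_equal_skyscanner_date_openers_py := by
  intro role step_selectors _
  unfold Spec_skyscanner_date_openers_py skyscanner_date_openers_py skyscanner_date_openers_py_alt
  simp only [pvA_part, List.nil_append]
  by_cases hr : (PySem.Str.lower (PySem.Str.strip (if role == "" then "" else role)) == "return") = true
  · simp only [hr, if_true]
    exact pv_main_core _ _ (by decide) (by decide)
  · simp only [if_neg hr]
    exact pv_main_core _ _ (by decide) (by decide)
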